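-- pv_equiv track=rewrite | github.com/syming123/ComputerVision | assignment2/functions.py | figure_correct_P2
-- ===== SOURCE A (Python) =====
-- def figure_correct_P2(pts3ds):
--     correct = 0
--     max_corr_pts = 0
--     for i in range(len(pts3ds)):
--         corr_pts = 0
--         for j in range(len(pts3ds[i])):
--             if(pts3ds[i][j][2] > 0):
--                 corr_pts = corr_pts + 1
--         if(max_corr_pts < corr_pts):
--             max_corr_pts = corr_pts
--             correct = i
--     return correct
-- ===== SOURCE B (Python) =====
-- def figure_correct_P2(pts3ds):
--     # Sort-based: stably sort the set indices by descending positive-z count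
--     # (negated count, stable sort keeps ties at the earliest index) and take the first.
--     n = len(pts3ds)
--     if n == 0:
--         return 0
--     def neg_count(i):
--         return -sum(p[2] > 0 for p in pts3ds[i])
--     return sorted(range(n), key=neg_count)[0]
-- ===== Notes on version B (the rewrite author's own statement) =====
-- stated objective: alternative
-- what changed: Replaces the running-argmax scan by a sort: indices are stably sorted by negated positive-z count and the first element of the sorted order is returned (stability makes ties resolve to the earliest index, matching A's strict '<' update).
import Mathlib
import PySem

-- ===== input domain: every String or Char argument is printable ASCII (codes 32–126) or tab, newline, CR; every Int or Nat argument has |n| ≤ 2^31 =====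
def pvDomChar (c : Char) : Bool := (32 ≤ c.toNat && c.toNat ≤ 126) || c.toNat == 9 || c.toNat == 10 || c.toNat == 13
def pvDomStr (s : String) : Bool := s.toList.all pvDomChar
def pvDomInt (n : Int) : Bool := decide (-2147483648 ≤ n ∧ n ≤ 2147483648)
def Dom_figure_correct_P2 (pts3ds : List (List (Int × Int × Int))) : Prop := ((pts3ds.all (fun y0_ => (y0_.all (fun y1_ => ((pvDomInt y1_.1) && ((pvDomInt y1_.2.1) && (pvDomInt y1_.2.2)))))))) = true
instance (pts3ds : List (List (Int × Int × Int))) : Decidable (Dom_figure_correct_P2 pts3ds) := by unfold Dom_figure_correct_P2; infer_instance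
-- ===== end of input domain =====

-- B replaces A's running-argmax scan by stably sorting the set indices by negated
-- positive-z count and taking the first (ties resolve to the earliest index); objective: alternative.


-- ===== PORT A =====
def figure_correct_P2 (pts3ds : List (List (Int × Int × Int))) : Int :=
  ((PySem.List.pyRange 0 (pts3ds.length : Int) 1).foldl
    (fun (st : Int × Int) i =>
      let pts := PySem.List.pyGetD pts3ds i []
      let corr_pts := (PySem.List.pyRange 0 (pts.length : Int) 1).foldl
        (fun c j => if (PySem.List.pyGetD pts j (0, 0, 0)).2.2 > 0 then c + 1 else c) (0 : Int)
      if st.2 < corr_pts then (i, corr_pts) else st)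
    ((0 : Int), (0 : Int))).1

-- ===== PORT B =====
def figure_correct_P2_alt (pts3ds : List (List (Int × Int × Int))) : Int :=
  let n : Int := (pts3ds.length : Int)
  if n = 0 then 0
  else
    let neg_count : Int → Int := fun i =>
      -(((PySem.List.pyGetD pts3ds i []).countP (fun p => p.2.2 > 0) : Int))
    PySem.List.pyGetD (PySem.List.sorted (PySem.List.pyRange 0 n 1) neg_count) 0 0

-- ===== PRECONDITION & SPEC =====
def Spec_figure_correct_P2 (pts3ds : List (List (Int × Int × Int))) (out : Int) : Prop := out = figure_correct_P2_alt pts3ds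
instance (pts3ds : List (List (Int × Int × Int))) (out : Int) : Decidable (Spec_figure_correct_P2 pts3ds out) := by unfold Spec_figure_correct_P2; infer_instance

-- ===== CLAIM (what is proved, stated in full; the proofs are below) =====
def Claim_equal_figure_correct_P2 : Prop := ∀ (pts3ds : List (List (Int × Int × Int))), Dom_figure_correct_P2 pts3ds → Spec_figure_correct_P2 pts3ds (figure_correct_P2 pts3ds)

-- ===== LEMMAS AND PROOFS =====

-- A's inner loop computes the countP count
theorem pvInnerCount (pts : List (Int × Int × Int)) :
    (PySem.List.pyRange 0 (pts.length : Int) 1).foldl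
      (fun c j => if (PySem.List.pyGetD pts j (0, 0, 0)).2.2 > 0 then c + 1 else c) (0 : Int)
    = ((pts.countP (fun p => p.2.2 > 0) : Int)) := by
  rw [PySem.List.foldl_pyRange_zero_pyGetD' pts (0, 0, 0)
        (fun c p => if p.2.2 > 0 then c + 1 else c) 0]
  have h : (fun (c : Int) (p : Int × Int × Int) => if p.2.2 > 0 then c + 1 else c)
      = (fun c p => if (decide (p.2.2 > 0)) = true then c + 1 else c) := by
    funext c p; by_cases hp : p.2.2 > 0 <;> simp [hp]
  rw [h, PySem.List.foldl_count_if (fun p => decide (p.2.2 > 0)) pts 0]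
  simp

-- head of insertion into a nonempty list: the smaller-keyed of x and the old head
theorem pvHead_insertBy (key : Int → Int) (x h : Int) (t : List Int) :
    (PySem.List.insertBy (fun a b => decide (key a < key b)) x (h :: t)).head?
      = some (if key x < key h then x else h) := by
  by_cases hx : key x < key h <;> simp [PySem.List.insertBy, hx]

-- head of the whole insertion-sort fold = left fold of the strict-min step over the heads
theorem pvHead_sortFold (key : Int → Int) (xs : List Int) : ∀ (acc : List Int) (h : Int),
    acc.head? = some h →
    ((xs.foldl (fun acc x => PySem.List.insertBy (fun a b => decide (key a < key b)) x acc) acc).head?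
      = some (xs.foldl (fun b x => if key x < key b then x else b) h)) := by
  induction xs with
  | nil => intro acc h hh; simpa using hh
  | cons x xs ih =>
    intro acc h hh
    cases acc with
    | nil => simp at hh
    | cons a t =>
      have ha : a = h := by simpa using hh
      subst ha
      simp only [List.foldl_cons]
      exact ih _ _ (pvHead_insertBy key x a t)

-- A's outer fold with a coherent state (b, cnt b) tracks the strict-argmax step fold
theorem pvOuterFold (cnt : Int → Int) (l : List Int) : ∀ (b : Int),
    l.foldl (fun (st : Int × Int) i => if st.2 < cnt i then (i, cnt i) else st) (b, cnt b)
      = (l.foldl (fun b i => if cnt b < cnt i then i else b) b,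
         cnt (l.foldl (fun b i => if cnt b < cnt i then i else b) b)) := by
  induction l with
  | nil => intro b; simp
  | cons i l ih =>
    intro b
    simp only [List.foldl_cons]
    by_cases h : cnt b < cnt i
    · simp only [if_pos h]; exact ih i
    · simp only [if_neg h]; exact ih b

-- ===== VERDICT (by name: the statement is the Claim_ definition above) =====
theorem figure_correct_P2_spec : Claim_equal_figure_correct_P2 := by
  intro pts3ds _
  unfold Spec_figure_correct_P2 figure_correct_P2 figure_correct_P2_alt
  simp only [pvInnerCount]
  set cnt : Int → Int := fun i =>
    ((PySem.List.pyGetD pts3ds i []).countP (fun p => p.2.2 > 0) : Int) with hcnt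
  by_cases hn : (pts3ds.length : Int) = 0
  · have h0 : PySem.List.pyRange 0 (pts3ds.length : Int) 1 = [] :=
      PySem.List.pyRange_one_eq_nil (le_of_eq hn)
    simp [hn]
  · have hpos : (0 : Int) < (pts3ds.length : Int) := by
      rcases lt_or_eq_of_le (Int.natCast_nonneg pts3ds.length) with h | h
      · exact h
      · exact absurd h.symm hn
    have hcons : PySem.List.pyRange 0 (pts3ds.length : Int) 1
        = 0 :: PySem.List.pyRange 1 (pts3ds.length : Int) 1 := by
      simpa using PySem.List.pyRange_one_cons hpos
    set rest := PySem.List.pyRange 1 (pts3ds.length : Int) 1 with hrest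
    -- A side
    have hc0 : (0 : Int) ≤ cnt 0 := by simp [hcnt]
    have hA : ((PySem.List.pyRange 0 (pts3ds.length : Int) 1).foldl
        (fun (st : Int × Int) i => if st.2 < cnt i then (i, cnt i) else st)
        ((0 : Int), (0 : Int))).1
        = rest.foldl (fun b i => if cnt b < cnt i then i else b) 0 := by
      rw [hcons]
      simp only [List.foldl_cons]
      have hfirst : (if (0 : Int) < cnt 0 then ((0 : Int), cnt 0) else ((0 : Int), (0 : Int)))
          = ((0 : Int), cnt 0) := by
        by_cases h : (0 : Int) < cnt 0
        · simp [h]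
        · have : cnt 0 = 0 := le_antisymm (not_lt.1 h) hc0
          simp [this]
      rw [hfirst, pvOuterFold]
    -- B side
    set negc : Int → Int := fun i => -(cnt i) with hnegc
    have hstep : (fun (b x : Int) => if negc x < negc b then x else b)
        = (fun b x => if cnt b < cnt x then x else b) := by
      funext b x
      by_cases h : cnt b < cnt x
      · rw [if_pos h, if_pos (by simp [hnegc]; omega)]
      · rw [if_neg h, if_neg (by simp [hnegc]; omega)]
    have hB : (PySem.List.sorted (PySem.List.pyRange 0 (pts3ds.length : Int) 1) negc).head?
        = some (rest.foldl (fun b i => if cnt b < cnt i then i else b) 0) := by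
      rw [PySem.List.sorted_eq_foldl_insertBy, hcons]
      simp only [List.foldl_cons]
      have h1 : PySem.List.insertBy (fun a b => decide (negc a < negc b)) 0 ([] : List Int)
          = [0] := by simp [PySem.List.insertBy]
      rw [h1, pvHead_sortFold negc rest [0] 0 (by simp), hstep]
    obtain ⟨t, ht⟩ : ∃ t, PySem.List.sorted (PySem.List.pyRange 0 (pts3ds.length : Int) 1) negc
        = (rest.foldl (fun b i => if cnt b < cnt i then i else b) 0) :: t := by
      cases hs : PySem.List.sorted (PySem.List.pyRange 0 (pts3ds.length : Int) 1) negc with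
      | nil => rw [hs] at hB; simp at hB
      | cons a t => rw [hs] at hB; exact ⟨t, by simpa using hB⟩
    rw [hA]
    simp only [if_neg hn]
    rw [ht]
    simp [PySem.List.pyGetD, PySem.List.pyGet?, PySem.List.pyIdx?]
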